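-- pv_equiv track=rewrite | github.com/rafaiska/6915_BeisInvestor | src/agent/bayesnet_constructor.py | generate_patternmap
-- ===== SOURCE A (Python) =====
-- def generate_patternmap(blists, companies):
--     patternmap = {}
--     length = None
--     for company_name in companies:
--         patternmap[company_name] = {}
--         if length is None or len(blists[company_name]) < length:
--             length = len(blists[company_name])
--
--     for i in range(length - 1):
--         pattern_string = ''
--         for company_name in blists:
--             pattern_string += blists[company_name][i]
--         for company_name in blists:
--             if blists[company_name][i + 1] == 'n':
--                 continue
--             if pattern_string not in patternmap[company_name].keys():
--                 patternmap[company_name][pattern_string] = []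
--             patternmap[company_name][pattern_string].append(blists[company_name][i + 1])
--     return patternmap
-- ===== SOURCE B (Python) =====
-- def generate_patternmap(blists, companies):
--     length = min(len(blists[c]) for c in companies)
--     cols = [''.join(col) for col in zip(*blists.values())]
--     patternmap = {c: {} for c in companies}
--     for c, row in blists.items():
--         pairs = [(cols[i], row[i + 1]) for i in range(length - 1) if row[i + 1] != 'n']
--         if pairs:
--             seen = []
--             for p, _ in pairs:
--                 if p not in seen:
--                     seen.append(p)
--             patternmap[c] = {p: [n for q, n in pairs if q == p] for p in seen}
--     return patternmap
-- ===== Notes on version B (the rewrite author's own statement) =====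
-- stated objective: alternative
-- what changed: B builds the result by group-by instead of A's incremental appends: it transposes the rows once into a column/pattern table, collects each company's (pattern, next) pair list, and constructs every bucket as a single filter pass over that list (first-occurrence key order via an explicit seen set), where A interleaves per-position dict mutations that grow each bucket one element at a time.
import Mathlib
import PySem

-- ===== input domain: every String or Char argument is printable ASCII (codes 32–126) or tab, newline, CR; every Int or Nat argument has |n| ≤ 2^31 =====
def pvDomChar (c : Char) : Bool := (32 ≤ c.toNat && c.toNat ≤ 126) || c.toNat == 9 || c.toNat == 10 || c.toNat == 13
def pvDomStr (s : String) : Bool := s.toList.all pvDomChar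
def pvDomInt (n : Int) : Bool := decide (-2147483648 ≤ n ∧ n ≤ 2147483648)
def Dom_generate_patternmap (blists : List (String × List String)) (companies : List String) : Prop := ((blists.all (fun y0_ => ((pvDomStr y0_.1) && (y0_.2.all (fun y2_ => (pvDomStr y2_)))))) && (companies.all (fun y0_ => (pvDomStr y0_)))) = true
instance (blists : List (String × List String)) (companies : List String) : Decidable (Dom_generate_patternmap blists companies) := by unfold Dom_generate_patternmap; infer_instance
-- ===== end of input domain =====

-- B replaces A's incremental bucket-appending with a group-by construction: it transposes the rows once, collects each company's (pattern, next) pair list, and builds every bucket as one filter pass over that list; return value proved equal on Pre_ (objective: alternative, not faster).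


-- ===== PORT A =====
def generate_patternmap (blists : List (String × List String)) (companies : List String) :
    List (String × List (String × List String)) :=
  let bd : PySem.Dict String (List String) := ⟨blists⟩
  -- first loop: patternmap[c] = {} and the running minimum 'length' (None modelled as Option)
  let st := companies.foldl
    (fun (s : PySem.Dict String (PySem.Dict String (List String)) × Option Int) c =>
      let pm := s.1.insert c PySem.Dict.empty
      let n : Int := ((bd.getD c []).length : Int)
      match s.2 with
      | none => (pm, some n)
      | some l => if n < l then (pm, some n) else (pm, some l))
    (PySem.Dict.empty, none)
  let length : Int := st.2.getD 0
  let keys := blists.map (·.1)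
  let pm := (PySem.List.pyRange 0 (length - 1) 1).foldl
    (fun pm i =>
      let pattern := keys.foldl (fun acc c => acc ++ PySem.List.pyGetD (bd.getD c []) i "") ""
      keys.foldl (fun pm c =>
        let nxt := PySem.List.pyGetD (bd.getD c []) (i + 1) ""
        if nxt == "n" then pm
        else
          let inner := pm.getD c PySem.Dict.empty
          let inner := if inner.contains pattern then inner else inner.insert pattern []
          pm.insert c (inner.insert pattern (inner.getD pattern [] ++ [nxt]))) pm)
    st.1
  pm.items.map (fun q => (q.1, q.2.items))

-- ===== PORT B =====
def generate_patternmap_alt (blists : List (String × List String)) (companies : List String) :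
    List (String × List (String × List String)) :=
  let bd : PySem.Dict String (List String) := ⟨blists⟩
  let length : Int :=
    (PySem.List.min? (companies.map (fun c => ((bd.getD c []).length : Int))) (fun x => x)).getD 0
  let rows := blists.map (·.2)
  -- cols = [''.join(col) for col in zip(*blists.values())] : zip truncates to the shortest row
  let m : Int := (PySem.List.min? (rows.map (fun r => (r.length : Int))) (fun x => x)).getD 0
  let cols : List String := (PySem.List.pyRange 0 m 1).map
    (fun j => rows.foldl (fun acc r => acc ++ PySem.List.pyGetD r j "") "")
  let init : PySem.Dict String (PySem.Dict String (List String)) :=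
    companies.foldl (fun d c => d.insert c PySem.Dict.empty) PySem.Dict.empty
  let pm := blists.foldl
    (fun pm p =>
      let pairs : List (String × String) :=
        ((PySem.List.pyRange 0 (length - 1) 1).filter
          (fun i => !(PySem.List.pyGetD p.2 (i + 1) "" == "n"))).map
          (fun i => (PySem.List.pyGetD cols i "", PySem.List.pyGetD p.2 (i + 1) ""))
      if pairs.isEmpty then pm
      else
        let seen : PySem.Set String :=
          pairs.foldl (fun s q => PySem.Set.add s q.1) PySem.Set.empty
        pm.insert p.1
          (seen.foldl (fun d k => d.insert k ((pairs.filter (fun q => q.1 == k)).map (·.2)))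
            PySem.Dict.empty))
    init
  pm.items.map (fun q => (q.1, q.2.items))

-- ===== PRECONDITION & SPEC =====
-- Pre_ excludes exactly the inputs where A raises: empty companies (TypeError on None - 1),
-- duplicate blists keys (not a Python dict), a company missing from blists (KeyError),
-- a blists row shorter than the minimum company length when positions are scanned (IndexError),
-- and a blists-only company with a non-'n' transition in range (KeyError).
def Pre_generate_patternmap (blists : List (String × List String)) (companies : List String) : Prop :=
  companies ≠ [] ∧
  (blists.map (·.1)).Nodup ∧
  (∀ c ∈ companies, c ∈ blists.map (·.1)) ∧
  (1 < (PySem.List.min? (companies.map (fun c => (((PySem.Dict.mk blists).getD c []).length : Int))) (fun x => x)).getD 0 →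
    ∀ p ∈ blists, (PySem.List.min? (companies.map (fun c => (((PySem.Dict.mk blists).getD c []).length : Int))) (fun x => x)).getD 0 ≤ (p.2.length : Int)) ∧
  (∀ p ∈ blists, p.1 ∈ companies ∨
    ∀ i ∈ PySem.List.pyRange 0 ((PySem.List.min? (companies.map (fun c => (((PySem.Dict.mk blists).getD c []).length : Int))) (fun x => x)).getD 0 - 1) 1,
      PySem.List.pyGetD p.2 (i + 1) "" = "n")
instance (blists : List (String × List String)) (companies : List String) : Decidable (Pre_generate_patternmap blists companies) := by unfold Pre_generate_patternmap; infer_instance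

def pvWitness_generate_patternmap : (List (String × List String)) × List String :=
  ([("A", ["y", "n", "y"]), ("B", ["n", "y", "y"])], ["A", "B"])

def Spec_generate_patternmap (blists : List (String × List String)) (companies : List String) (out : List (String × List (String × List String))) : Prop := out = generate_patternmap_alt blists companies
instance (blists : List (String × List String)) (companies : List String) (out : List (String × List (String × List String))) : Decidable (Spec_generate_patternmap blists companies out) := by unfold Spec_generate_patternmap; infer_instance

-- ===== CLAIM (what is proved, stated in full; the proofs are below) =====
def Claim_equal_generate_patternmap : Prop := ∀ (blists : List (String × List String)) (companies : List String), Dom_generate_patternmap blists companies → Pre_generate_patternmap blists companies → Spec_generate_patternmap blists companies (generate_patternmap blists companies)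

-- ===== LEMMAS AND PROOFS =====

-- abbreviations used only by the proofs
def pvLen (blists : List (String × List String)) (companies : List String) : Int :=
  (PySem.List.min? (companies.map (fun c => (((PySem.Dict.mk blists).getD c []).length : Int))) (fun x => x)).getD 0

def pvPat (blists : List (String × List String)) (i : Int) : String :=
  List.foldl (fun acc c => acc ++ PySem.List.pyGetD ((PySem.Dict.mk blists).getD c []) i "") "" (blists.map (·.1))

def pvNxt (blists : List (String × List String)) (c : String) (i : Int) : String :=
  PySem.List.pyGetD ((PySem.Dict.mk blists).getD c []) (i + 1) ""

def pvInit (companies : List String) : PySem.Dict String (PySem.Dict String (List String)) :=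
  companies.foldl (fun d c => d.insert c PySem.Dict.empty) PySem.Dict.empty

def pvColsB (blists : List (String × List String)) : List String :=
  (PySem.List.pyRange 0 ((PySem.List.min? ((blists.map (·.2)).map (fun r => (r.length : Int))) (fun x => x)).getD 0) 1).map
    (fun j => (blists.map (·.2)).foldl (fun acc r => acc ++ PySem.List.pyGetD r j "") "")

def pvPairsB (blists : List (String × List String)) (companies : List String) (p : String × List String) : List (String × String) :=
  ((PySem.List.pyRange 0 (pvLen blists companies - 1) 1).filter
    (fun i => !(PySem.List.pyGetD p.2 (i + 1) "" == "n"))).map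
    (fun i => (PySem.List.pyGetD (pvColsB blists) i "", PySem.List.pyGetD p.2 (i + 1) ""))

def pvPairsA (blists : List (String × List String)) (companies : List String) (c : String) : List (String × String) :=
  ((PySem.List.pyRange 0 (pvLen blists companies - 1) 1).filter
    (fun i => !(pvNxt blists c i == "n"))).map
    (fun i => (pvPat blists i, pvNxt blists c i))

def pvGroup (ps : List (String × String)) : PySem.Dict String (List String) :=
  (ps.foldl (fun s q => PySem.Set.add s q.1) PySem.Set.empty).foldl
    (fun d k => d.insert k ((ps.filter (fun q => q.1 == k)).map (·.2))) PySem.Dict.empty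

def pvLoop {ν : Type} (P : String → Int → Bool) (h : String → Int → ν → ν)
    (is : List Int) (c : String) (v : ν) : ν :=
  is.foldl (fun v i => if P c i then v else h c i v) v

lemma pv_step_keys {ν : Type} (P : String → Int → Bool) (h : String → Int → ν → ν) (e : ν)
    (d : PySem.Dict String ν) (c : String) (i : Int) (hc : P c i = false → c ∈ d.keys) :
    (if P c i then d else d.modify c e (h c i)).keys = d.keys := by
  by_cases hp : P c i
  · simp [hp]
  · have hcm : c ∈ d.keys := hc (by simpa using hp)
    rw [if_neg hp, PySem.Dict.keys_modify, PySem.Dict.keys_insert_of_contains]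
    exact (PySem.Dict.contains_iff_mem_keys _ _).mpr hcm

lemma pv_step_getD {ν : Type} (P : String → Int → Bool) (h : String → Int → ν → ν) (e : ν)
    (d : PySem.Dict String ν) (c c' : String) (i : Int) :
    (if P c i then d else d.modify c e (h c i)).getD c' e
      = if c' = c ∧ P c i = false then h c i (d.getD c e) else d.getD c' e := by
  by_cases hp : P c i
  · simp [hp]
  · by_cases hcc : c' = c <;> simp [hp, hcc, PySem.Dict.getD_modify]

lemma pv_inner {ν : Type} (P : String → Int → Bool) (h : String → Int → ν → ν) (e : ν) (i : Int) :
    ∀ (cs : List String) (d : PySem.Dict String ν), cs.Nodup →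
    (∀ c ∈ cs, P c i = false → c ∈ d.keys) →
    ((cs.foldl (fun d c => if P c i then d else d.modify c e (h c i)) d).keys = d.keys ∧
     ∀ c', (cs.foldl (fun d c => if P c i then d else d.modify c e (h c i)) d).getD c' e
        = if c' ∈ cs ∧ P c' i = false then h c' i (d.getD c' e) else d.getD c' e) := by
  intro cs
  induction cs with
  | nil => intro d _ _; simp
  | cons c cs ih =>
    intro d hnd hmem
    have hkeys1 := pv_step_keys P h e d c i (hmem c (by simp))
    obtain ⟨ihk, ihg⟩ := ih _ (List.nodup_cons.mp hnd).2
      (fun c' hc' hp => by rw [hkeys1]; exact hmem c' (by simp [hc']) hp)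
    refine ⟨by rw [List.foldl_cons, ihk, hkeys1], ?_⟩
    intro c'
    rw [List.foldl_cons, ihg c', pv_step_getD]
    by_cases hcc : c' = c
    · subst hcc
      have : c' ∉ cs := (List.nodup_cons.mp hnd).1
      by_cases hp : P c' i = false <;> simp [this, hp]
    · by_cases hcs : c' ∈ cs <;> by_cases hp : P c' i = false <;> simp [hcc, hcs, hp]

lemma pv_imajor {ν : Type} (P : String → Int → Bool) (h : String → Int → ν → ν) (e : ν)
    (cs : List String) (hnd : cs.Nodup) :
    ∀ (is : List Int) (d : PySem.Dict String ν),
    (∀ c ∈ cs, ∀ i ∈ is, P c i = false → c ∈ d.keys) →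
    ((is.foldl (fun d i => cs.foldl (fun d c => if P c i then d else d.modify c e (h c i)) d) d).keys = d.keys ∧
     ∀ c', (is.foldl (fun d i => cs.foldl (fun d c => if P c i then d else d.modify c e (h c i)) d) d).getD c' e
        = if c' ∈ cs then pvLoop P h is c' (d.getD c' e) else d.getD c' e) := by
  intro is
  induction is with
  | nil => intro d _; simp [pvLoop]
  | cons i is ih =>
    intro d hmem
    obtain ⟨hk1, hg1⟩ := pv_inner P h e i cs d hnd (fun c hc => hmem c hc i (by simp))
    obtain ⟨ihk, ihg⟩ := ih _ (fun c hc i' hi' hp => by rw [hk1]; exact hmem c hc i' (by simp [hi']) hp)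
    refine ⟨by rw [List.foldl_cons, ihk, hk1], ?_⟩
    intro c'
    rw [List.foldl_cons, ihg c', hg1 c']
    by_cases hcs : c' ∈ cs
    · by_cases hp : P c' i = false <;>
        simp only [hcs, hp, and_true, if_true, true_and, pvLoop, List.foldl_cons] <;>
        simp_all [Bool.not_eq_false]
    · simp [hcs]

-- the B-side outer fold: each step touches only key p.1 (or nothing)
lemma pv_bfold {β ν : Type} (cond : (String × β) → Bool) (g : (String × β) → ν) (e : ν) :
    ∀ (l : List (String × β)) (d : PySem.Dict String ν), (l.map (·.1)).Nodup →
    (∀ p ∈ l, cond p = false → p.1 ∈ d.keys) →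
    ((l.foldl (fun d p => if cond p then d else d.insert p.1 (g p)) d).keys = d.keys ∧
     (∀ c', c' ∉ l.map (·.1) →
        (l.foldl (fun d p => if cond p then d else d.insert p.1 (g p)) d).getD c' e = d.getD c' e) ∧
     (∀ p ∈ l,
        (l.foldl (fun d p => if cond p then d else d.insert p.1 (g p)) d).getD p.1 e
          = if cond p then d.getD p.1 e else g p)) := by
  intro l
  induction l with
  | nil => intro d _ _; simp
  | cons q l ih =>
    intro d hnd hmem
    have hnd2 : q.1 ∉ l.map (·.1) ∧ (l.map (·.1)).Nodup := by
      rw [List.map_cons] at hnd; exact List.nodup_cons.mp hnd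
    have hq1 : q.1 ∉ l.map (·.1) := hnd2.1
    have hkeys1 : (if cond q then d else d.insert q.1 (g q)).keys = d.keys := by
      by_cases hc : cond q
      · simp [hc]
      · rw [if_neg hc, PySem.Dict.keys_insert_of_contains]
        exact (PySem.Dict.contains_iff_mem_keys _ _).mpr (hmem q (by simp) (by simpa using hc))
    have hgd1 : ∀ c', c' ≠ q.1 → (if cond q then d else d.insert q.1 (g q)).getD c' e = d.getD c' e := by
      intro c' hne
      by_cases hc : cond q
      · simp [hc]
      · rw [if_neg hc, PySem.Dict.getD_insert_of_ne _ _ _ hne]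
    obtain ⟨ihk, ihm, ihp⟩ := ih _ hnd2.2
      (fun p hp hc => by rw [hkeys1]; exact hmem p (by simp [hp]) hc)
    refine ⟨by rw [List.foldl_cons, ihk, hkeys1], ?_, ?_⟩
    · intro c' hc'
      have hne : c' ≠ q.1 := fun h => hc' (by simp [h])
      have hnl : c' ∉ l.map (·.1) := fun h => hc' (by simp [h])
      rw [List.foldl_cons, ihm c' hnl, hgd1 c' hne]
    · intro p hp
      rcases List.mem_cons.mp hp with rfl | hpl
      · rw [List.foldl_cons, ihm p.1 hq1]
        by_cases hc : cond p
        · simp [hc]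
        · simp [hc, PySem.Dict.getD_insert_self]
      · have hne : p.1 ≠ q.1 := by
          intro h; exact hq1 (h ▸ List.mem_map.mpr ⟨p, hpl, rfl⟩)
        rw [List.foldl_cons, ihp p hpl, hgd1 p.1 hne]

lemma pv_loop_filter {α ν : Type} (P : α → Bool) (f : α → ν → ν) :
    ∀ (is : List α) (v : ν),
      is.foldl (fun v i => if P i then v else f i v) v
        = (is.filter (fun i => !P i)).foldl (fun v i => f i v) v := by
  intro is
  induction is with
  | nil => intro v; rfl
  | cons i is ih =>
    intro v
    by_cases hp : P i <;> simp [hp, ih]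

lemma pv_dict_eq {ν : Type} (d1 d2 : PySem.Dict String ν) (e : ν)
    (hnd : d1.keys.Nodup) (hk : d1.keys = d2.keys) (hg : ∀ c, d1.getD c e = d2.getD c e) :
    d1 = d2 := by
  apply PySem.Dict.ext
  rw [PySem.Dict.items_eq_map_keys d1 hnd e, PySem.Dict.items_eq_map_keys d2 (hk ▸ hnd) e, ← hk]
  exact List.map_congr_left (fun k _ => by rw [hg k])

lemma pv_getD_mk_self (blists : List (String × List String))
    (hnd : (blists.map (·.1)).Nodup) (p : String × List String) (hp : p ∈ blists) :
    (PySem.Dict.mk blists).getD p.1 [] = p.2 :=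
  PySem.Dict.getD_of_mem_items (PySem.Dict.mk blists) (by simpa using hp) (by simpa using hnd) []

lemma pv_mem_init_keys {ν : Type} (e : ν) :
    ∀ (companies : List String) (d : PySem.Dict String ν) (c : String),
    c ∈ companies ∨ c ∈ d.keys →
    c ∈ (companies.foldl (fun d c => d.insert c e) d).keys := by
  intro companies
  induction companies with
  | nil => intro d c hc; simpa using hc
  | cons c0 cs ih =>
    intro d c hc
    rw [List.foldl_cons]
    apply ih
    rcases hc with hc | hc
    · rcases List.mem_cons.mp hc with hc | hc
      · right; rw [hc]; exact (PySem.Dict.mem_keys_insert _ _ _ _).mpr (Or.inl rfl)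
      · left; exact hc
    · right; exact (PySem.Dict.mem_keys_insert _ _ _ _).mpr (Or.inr hc)

lemma pv_init_getD {ν : Type} (e : ν) :
    ∀ (companies : List String) (d : PySem.Dict String ν) (c' : String),
    (∀ c'', d.getD c'' e = e) →
    (companies.foldl (fun d c => d.insert c e) d).getD c' e = e := by
  intro companies
  induction companies with
  | nil => intro d c' hd; exact hd c'
  | cons c0 cs ih =>
    intro d c' hd
    rw [List.foldl_cons]
    exact ih _ c' (fun c'' => by
      by_cases h : c'' = c0
      · subst h; exact PySem.Dict.getD_insert_self _ _ _ _
      · rw [PySem.Dict.getD_insert_of_ne _ _ _ h]; exact hd c'')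

lemma pv_astep (pm : PySem.Dict String (PySem.Dict String (List String)))
    (c pat nxt : String) :
    (pm.insert c
      ((if (pm.getD c PySem.Dict.empty).contains pat then pm.getD c PySem.Dict.empty
        else (pm.getD c PySem.Dict.empty).insert pat []).insert pat
        (((if (pm.getD c PySem.Dict.empty).contains pat then pm.getD c PySem.Dict.empty
        else (pm.getD c PySem.Dict.empty).insert pat []).getD pat []) ++ [nxt])))
    = pm.modify c PySem.Dict.empty (fun inner => inner.modify pat [] (· ++ [nxt])) := by
  by_cases hc : (pm.getD c PySem.Dict.empty).contains pat
  · simp [hc, PySem.Dict.modify]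
  · have hg : (pm.getD c PySem.Dict.empty).getD pat [] = [] :=
      PySem.Dict.getD_of_not_contains (pm.getD c PySem.Dict.empty) [] (by simpa using hc)
    simp only [hc, Bool.false_eq_true, if_false]
    rw [PySem.Dict.modify, PySem.Dict.modify]
    rw [PySem.Dict.getD_insert_self, PySem.Dict.insert_insert_self, hg]

lemma pv_pairfold (n : String → Int) :
    ∀ (companies : List String) (d : PySem.Dict String (PySem.Dict String (List String))) (o : Option Int),
    (companies.foldl (fun (s : PySem.Dict String (PySem.Dict String (List String)) × Option Int) c =>
        match s.2 with
        | none => (s.1.insert c PySem.Dict.empty, some (n c))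
        | some l => if n c < l then (s.1.insert c PySem.Dict.empty, some (n c))
                    else (s.1.insert c PySem.Dict.empty, some l)) (d, o))
    = (companies.foldl (fun d c => d.insert c PySem.Dict.empty) d,
       companies.foldl (fun o c =>
        match o with
        | none => some (n c)
        | some m => if n c < m then some (n c) else some m) o) := by
  intro companies
  induction companies with
  | nil => intro d o; rfl
  | cons c cs ih =>
    intro d o
    rw [List.foldl_cons, List.foldl_cons, List.foldl_cons]
    cases o with
    | none => exact ih _ _
    | some l =>
      by_cases hl : n c < l
      · simp only [hl, if_true]; exact ih _ _
      · simp only [hl, if_false]; exact ih _ _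

lemma pv_min_eq (n : String → Int) (companies : List String) :
    PySem.List.min? (companies.map n) (fun x => x)
      = companies.foldl (fun o c =>
          match o with
          | none => some (n c)
          | some m => if n c < m then some (n c) else some m) none := by
  rw [PySem.List.min?, List.foldl_map]
  congr 1
  funext o c
  cases o <;> rfl

-- A's incremental bucket fold over any pair list equals B's group-by construction
lemma pv_groupfold (ps : List (String × String)) :
    ps.foldl (fun d q => d.modify q.1 [] (· ++ [q.2])) PySem.Dict.empty = pvGroup ps := by
  have hseen : ps.foldl (fun s q => PySem.Set.add s q.1) PySem.Set.empty
      = PySem.Set.ofList (ps.map (·.1)) := by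
    rw [PySem.Set.ofList_eq_foldl, List.foldl_map]; rfl
  have hkeys : (ps.foldl (fun d q => d.modify q.1 [] (· ++ [q.2])) (PySem.Dict.empty : PySem.Dict String (List String))).keys
      = PySem.Set.ofList (ps.map (·.1)) := by
    rw [PySem.Dict.keys_foldl_modify_key ps (fun q => q.1) [] (fun _ q => (· ++ [q.2])) PySem.Dict.empty]
    rfl
  have hnd : (ps.foldl (fun d q => d.modify q.1 [] (· ++ [q.2])) (PySem.Dict.empty : PySem.Dict String (List String))).keys.Nodup :=
    PySem.Dict.nodup_keys_foldl_modify_key ps (fun q => q.1) [] (fun _ q => (· ++ [q.2])) PySem.Dict.empty (by simp)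
  unfold pvGroup
  rw [hseen]
  apply PySem.Dict.ext
  rw [PySem.Dict.items_eq_map_keys _ hnd [], hkeys]
  rw [PySem.Dict.items_foldl_insert_fresh (PySem.Set.ofList (ps.map (·.1))) (fun k => k)
    (fun k => (ps.filter (fun q => q.1 == k)).map (·.2)) PySem.Dict.empty
    (fun a _ => PySem.Dict.contains_empty a) (by rw [List.map_id']; exact PySem.Set.nodup_ofList (ps.map (·.1)))]
  exact List.map_congr_left (fun k _ => by
    rw [PySem.Dict.getD_foldl_modify_append, PySem.Dict.getD_empty, List.nil_append])

lemma pv_pat_eq (blists : List (String × List String)) (hnd : (blists.map (·.1)).Nodup) (j : Int) :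
    (blists.map (·.2)).foldl (fun acc r => acc ++ PySem.List.pyGetD r j "") "" = pvPat blists j := by
  unfold pvPat
  rw [List.foldl_map, List.foldl_map]
  exact PySem.List.foldl_congr_mem _ _ _ _
    (fun acc p hp => by rw [pv_getD_mk_self blists hnd p hp])

-- for each blists row, B's pair list equals the A-side pair list (under Pre_)
lemma pv_pairs_agree (blists : List (String × List String)) (companies : List String)
    (hne : companies ≠ []) (hnd : (blists.map (·.1)).Nodup)
    (hc : ∀ c ∈ companies, c ∈ blists.map (·.1))
    (hlen : 1 < pvLen blists companies → ∀ p ∈ blists, pvLen blists companies ≤ (p.2.length : Int))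
    (p : String × List String) (hp : p ∈ blists) :
    pvPairsB blists companies p = pvPairsA blists companies p.1 := by
  unfold pvPairsB pvPairsA pvNxt
  rw [pv_getD_mk_self blists hnd p hp]
  refine List.map_congr_left (fun i hi => ?_)
  have hir : i ∈ PySem.List.pyRange 0 (pvLen blists companies - 1) 1 := (List.mem_filter.mp hi).1
  obtain ⟨hi0, hilt⟩ := PySem.List.mem_pyRange_one.mp hir
  have hL : 1 < pvLen blists companies := by omega
  have hbne : blists ≠ [] := by
    obtain ⟨c, hcm⟩ := List.exists_mem_of_ne_nil companies hne
    intro h; subst h; simpa using hc c hcm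
  have hm : pvLen blists companies ≤ (PySem.List.min? ((blists.map (·.2)).map (fun r => (r.length : Int))) (fun x => x)).getD 0 := by
    obtain ⟨v, hv⟩ : ∃ v, PySem.List.min? ((blists.map (·.2)).map (fun r => (r.length : Int))) (fun x => x) = some v := by
      rcases h : PySem.List.min? ((blists.map (·.2)).map (fun r => (r.length : Int))) (fun x => x) with _ | v
      · exfalso
        have := (PySem.List.min?_eq_none_iff (xs := (blists.map (·.2)).map (fun r => (r.length : Int))) (key := fun x => x)).mp h
        simp at this
        exact hbne this
      · exact ⟨v, h⟩
    rw [hv, Option.getD_some]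
    have hvm := PySem.List.min?_mem hv
    simp only [List.map_map, List.mem_map] at hvm
    obtain ⟨q, hq, rfl⟩ := hvm
    exact hlen hL q hq
  have him : i < (PySem.List.min? ((blists.map (·.2)).map (fun r => (r.length : Int))) (fun x => x)).getD 0 := by omega
  unfold pvColsB
  rw [PySem.List.pyGetD_map_pyRange_of_nonneg _ _ _ _ hi0 him, pv_pat_eq blists hnd i]

lemma pv_main (blists : List (String × List String)) (companies : List String)
    (hpre : Pre_generate_patternmap blists companies) :
    generate_patternmap blists companies = generate_patternmap_alt blists companies := by
  obtain ⟨hne, hnd, hcm, hlen0, hcov0⟩ := hpre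
  have hlen : 1 < pvLen blists companies → ∀ p ∈ blists, pvLen blists companies ≤ (p.2.length : Int) := hlen0
  have hcov : ∀ p ∈ blists, p.1 ∈ companies ∨
      ∀ i ∈ PySem.List.pyRange 0 (pvLen blists companies - 1) 1,
        PySem.List.pyGetD p.2 (i + 1) "" = "n" := hcov0
  have hA : generate_patternmap blists companies
      = ((PySem.List.pyRange 0 (pvLen blists companies - 1) 1).foldl
          (fun pm i => (blists.map (·.1)).foldl
            (fun pm c => if pvNxt blists c i == "n" then pm
              else pm.modify c PySem.Dict.empty
                (fun inner => inner.modify (pvPat blists i) [] (· ++ [pvNxt blists c i]))) pm)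
          (pvInit companies)).items.map (fun q => (q.1, q.2.items)) := by
    simp only [generate_patternmap, pvLen, pvNxt, pvPat, pvInit]
    rw [pv_pairfold, ← pv_min_eq]
    simp only [pv_astep]
  have hB : generate_patternmap_alt blists companies
      = (blists.foldl
          (fun pm p => if (pvPairsB blists companies p).isEmpty then pm
            else pm.insert p.1 (pvGroup (pvPairsB blists companies p)))
          (pvInit companies)).items.map (fun q => (q.1, q.2.items)) := by
    simp only [generate_patternmap_alt, pvPairsB, pvGroup, pvColsB, pvInit, pvLen]
  -- any blists entry with a recordable transition is a company (hence an init key)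
  have hrec : ∀ p ∈ blists, ∀ i ∈ PySem.List.pyRange 0 (pvLen blists companies - 1) 1,
      PySem.List.pyGetD p.2 (i + 1) "" ≠ "n" → p.1 ∈ (pvInit companies).keys := by
    intro p hp i hi hnn
    rcases hcov p hp with hin | halln
    · exact pv_mem_init_keys _ companies _ _ (Or.inl hin)
    · exact absurd (halln i hi) hnn
  have hgd0 : ∀ c', (pvInit companies).getD c' PySem.Dict.empty = PySem.Dict.empty :=
    fun c' => pv_init_getD _ companies PySem.Dict.empty c' (fun c'' => PySem.Dict.getD_empty c'' _)
  obtain ⟨hkA, hgA⟩ := pv_imajor (fun c i => pvNxt blists c i == "n")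
    (fun c i v => v.modify (pvPat blists i) [] (· ++ [pvNxt blists c i])) PySem.Dict.empty
    (blists.map (·.1)) hnd
    (PySem.List.pyRange 0 (pvLen blists companies - 1) 1) (pvInit companies)
    (by
      intro c hc i hi hP
      obtain ⟨p, hp, rfl⟩ := List.mem_map.mp hc
      refine hrec p hp i hi ?_
      replace hP : (pvNxt blists p.1 i == "n") = false := hP
      unfold pvNxt at hP
      rw [pv_getD_mk_self blists hnd p hp] at hP
      simpa using hP)
  obtain ⟨hkB, hgBm, hgBp⟩ := pv_bfold (fun p => (pvPairsB blists companies p).isEmpty)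
    (fun p => pvGroup (pvPairsB blists companies p)) PySem.Dict.empty blists (pvInit companies) hnd
    (by
      intro p hp hcond
      rcases hcov p hp with hin | halln
      · exact pv_mem_init_keys _ companies _ _ (Or.inl hin)
      · exfalso
        have : pvPairsB blists companies p = [] := by
          unfold pvPairsB
          rw [List.filter_eq_nil_iff.mpr (fun i hi => by simp [halln i hi])]
          rfl
        replace hcond : (pvPairsB blists companies p).isEmpty = false := hcond
        rw [this] at hcond
        simp at hcond)
  have hdict : ((PySem.List.pyRange 0 (pvLen blists companies - 1) 1).foldl
          (fun pm i => (blists.map (·.1)).foldl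
            (fun pm c => if pvNxt blists c i == "n" then pm
              else pm.modify c PySem.Dict.empty
                (fun inner => inner.modify (pvPat blists i) [] (· ++ [pvNxt blists c i]))) pm)
          (pvInit companies))
      = (blists.foldl
          (fun pm p => if (pvPairsB blists companies p).isEmpty then pm
            else pm.insert p.1 (pvGroup (pvPairsB blists companies p)))
          (pvInit companies)) := by
    refine pv_dict_eq _ _ PySem.Dict.empty (by
        rw [hkA]
        exact PySem.Dict.nodup_keys_foldl_insert companies (fun _ _ => PySem.Dict.empty)
          PySem.Dict.empty (by simp))
      (by rw [hkA, hkB]) ?_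
    intro c'
    rw [hgA c']
    by_cases hc' : c' ∈ blists.map (·.1)
    · obtain ⟨p, hp, rfl⟩ := List.mem_map.mp hc'
      rw [if_pos hc', hgBp p hp, hgd0 p.1]
      have hloop : pvLoop (fun c i => pvNxt blists c i == "n")
          (fun c i v => v.modify (pvPat blists i) [] (· ++ [pvNxt blists c i]))
          (PySem.List.pyRange 0 (pvLen blists companies - 1) 1) p.1 PySem.Dict.empty
          = pvGroup (pvPairsB blists companies p) := by
        unfold pvLoop
        beta_reduce
        rw [pv_loop_filter (fun i => pvNxt blists p.1 i == "n")
          (fun (i : Int) (v : PySem.Dict String (List String)) =>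
            v.modify (pvPat blists i) [] (· ++ [pvNxt blists p.1 i]))]
        rw [pv_pairs_agree blists companies hne hnd hcm hlen p hp]
        unfold pvPairsA
        rw [← pv_groupfold, List.foldl_map]
      rw [hloop]
      by_cases hemp : (pvPairsB blists companies p).isEmpty
      · rw [if_pos hemp]
        rw [List.isEmpty_iff.mp hemp]
        rfl
      · rw [if_neg hemp]
    · rw [if_neg hc', hgBm c' hc', hgd0 c']
  rw [hA, hB, hdict]

-- ===== VERDICT (by name: the statement is the Claim_ definition above) =====
theorem generate_patternmap_spec : Claim_equal_generate_patternmap := by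
  intro blists companies _ hpre
  exact pv_main blists companies hpre
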